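-- pv_equiv track=rewrite | github.com/Cerber2ol8/DnfWorkDeploy | utils.py | direct
-- ===== SOURCE A (Python) =====
-- def direct(directs):
--     if sum(d for d in directs) > 0:
--         if directs == [1,0,0,0]:
--             direct = "LEFT"
--         elif directs == [0,1,0,0]:
--             direct = "RIGHT"
--         elif directs == [0,0,1,0]:
--             direct = "UP"
--         elif directs == [0,0,0,1]:
--             direct = "DOWN"
--         elif directs == [1,0,1,0]:
--             direct = "LEFT_UP"
--         elif directs == [1,0,0,1]:
--             direct = "LEFT_DOWN"
--         elif directs == [0,1,1,0]:
--             direct = "RIGHT_UP"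
--         elif directs == [0,1,0,1]:
--             direct = "RIGHT_DOWN"
--         else:
--             direct = "STOP"
--
--         return direct
--     else:
--         return "STOP"
-- ===== SOURCE B (Python) =====
-- _NAMES = ["LEFT", "RIGHT", "UP", "DOWN"]
--
-- def direct(directs):
--     # Compose the label from its axis components: a direction vector is valid
--     # iff it has 4 entries in {0,1}, at most one horizontal flag, at most one
--     # vertical flag, and at least one flag set; its label is the '_'-join of
--     # the names of the set flags.
--     if (len(directs) == 4
--             and all(d in (0, 1) for d in directs)
--             and directs[0] + directs[1] <= 1
--             and directs[2] + directs[3] <= 1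
--             and sum(directs) > 0):
--         return "_".join(n for d, n in zip(directs, _NAMES) if d == 1)
--     return "STOP"
-- ===== Notes on version B (the rewrite author's own statement) =====
-- stated objective: simpler
-- what changed: B composes the label from its axis components: it validates the vector (4 entries in {0,1}, at most one horizontal and one vertical flag, at least one set) and builds the string by joining the names of the set flags with '_', instead of A's sum guard plus eight-way whole-vector equality ladder.
import Mathlib
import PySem

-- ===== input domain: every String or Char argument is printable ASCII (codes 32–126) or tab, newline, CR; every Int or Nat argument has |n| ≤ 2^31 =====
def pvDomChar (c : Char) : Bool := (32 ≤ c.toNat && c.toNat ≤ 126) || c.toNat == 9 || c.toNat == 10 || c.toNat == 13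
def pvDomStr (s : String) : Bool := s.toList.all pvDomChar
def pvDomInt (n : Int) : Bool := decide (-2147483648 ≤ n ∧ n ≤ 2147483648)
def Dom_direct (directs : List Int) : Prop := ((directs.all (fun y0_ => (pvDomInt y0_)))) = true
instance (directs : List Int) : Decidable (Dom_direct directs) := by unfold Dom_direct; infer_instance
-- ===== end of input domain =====

-- B composes the label from axis components (validity check + '_'-join of set-flag names)
-- instead of A's sum guard and eight-way equality ladder (objective: simpler).

-- ===== PORT A =====
def direct (directs : List Int) : String :=
  if directs.foldl (· + ·) 0 > 0 then
    if directs = [1,0,0,0] then "LEFT"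
    else if directs = [0,1,0,0] then "RIGHT"
    else if directs = [0,0,1,0] then "UP"
    else if directs = [0,0,0,1] then "DOWN"
    else if directs = [1,0,1,0] then "LEFT_UP"
    else if directs = [1,0,0,1] then "LEFT_DOWN"
    else if directs = [0,1,1,0] then "RIGHT_UP"
    else if directs = [0,1,0,1] then "RIGHT_DOWN"
    else "STOP"
  else "STOP"

-- ===== PORT B =====
def directNames : List String := ["LEFT", "RIGHT", "UP", "DOWN"]

def direct_alt (directs : List Int) : String :=
  if directs.length = 4
     ∧ directs.all (fun d => d = 0 ∨ d = 1)
     ∧ PySem.List.pyGetD directs 0 0 + PySem.List.pyGetD directs 1 0 ≤ 1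
     ∧ PySem.List.pyGetD directs 2 0 + PySem.List.pyGetD directs 3 0 ≤ 1
     ∧ directs.foldl (· + ·) 0 > 0 then
    PySem.Str.join "_" (((directs.zip directNames).filter (fun p => p.1 == 1)).map Prod.snd)
  else "STOP"

-- ===== PRECONDITION & SPEC =====
def Spec_direct (directs : List Int) (out : String) : Prop := out = direct_alt directs
instance (directs : List Int) (out : String) : Decidable (Spec_direct directs out) := by unfold Spec_direct; infer_instance

-- ===== CLAIM (what is proved, stated in full; the proofs are below) =====
def Claim_equal_direct : Prop := ∀ (directs : List Int), Dom_direct directs → Spec_direct directs (direct directs)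

-- ===== LEMMAS AND PROOFS =====

theorem direct_alt_not4 (directs : List Int) (h : directs.length ≠ 4) :
    direct_alt directs = "STOP" := by
  unfold direct_alt
  rw [if_neg]; intro hc; exact h hc.1

-- ===== VERDICT (by name: the statement is the Claim_ definition above) =====
theorem direct_spec : Claim_equal_direct := by
  intro directs _
  unfold Spec_direct
  match directs with
  | [a, b, c, d] =>
    by_cases ha0 : a = 0
    · subst ha0
      by_cases hb0 : b = 0
      · subst hb0
        by_cases hc0 : c = 0
        · subst hc0
          by_cases hd0 : d = 0
          · subst hd0; rfl
          · by_cases hd1 : d = 1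
            · subst hd1; rfl
            · simp [direct, direct_alt, hd0, hd1]; try omega
        · by_cases hc1 : c = 1
          · subst hc1
            by_cases hd0 : d = 0
            · subst hd0; rfl
            · by_cases hd1 : d = 1
              · subst hd1; rfl
              · simp [direct, direct_alt, hd0, hd1]; try omega
          · simp [direct, direct_alt, hc0, hc1]; try omega
      · by_cases hb1 : b = 1
        · subst hb1
          by_cases hc0 : c = 0
          · subst hc0
            by_cases hd0 : d = 0
            · subst hd0; rfl
            · by_cases hd1 : d = 1
              · subst hd1; rfl
              · simp [direct, direct_alt, hd0, hd1]; try omega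
          · by_cases hc1 : c = 1
            · subst hc1
              by_cases hd0 : d = 0
              · subst hd0; rfl
              · by_cases hd1 : d = 1
                · subst hd1; rfl
                · simp [direct, direct_alt, hd0, hd1]; try omega
            · simp [direct, direct_alt, hc0, hc1]; try omega
        · simp [direct, direct_alt, hb0, hb1]; try omega
    · by_cases ha1 : a = 1
      · subst ha1
        by_cases hb0 : b = 0
        · subst hb0
          by_cases hc0 : c = 0
          · subst hc0
            by_cases hd0 : d = 0
            · subst hd0; rfl
            · by_cases hd1 : d = 1
              · subst hd1; rfl
              · simp [direct, direct_alt, hd0, hd1]; try omega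
          · by_cases hc1 : c = 1
            · subst hc1
              by_cases hd0 : d = 0
              · subst hd0; rfl
              · by_cases hd1 : d = 1
                · subst hd1; rfl
                · simp [direct, direct_alt, hd0, hd1]; try omega
            · simp [direct, direct_alt, hc0, hc1]; try omega
        · by_cases hb1 : b = 1
          · subst hb1
            by_cases hc0 : c = 0
            · subst hc0
              by_cases hd0 : d = 0
              · subst hd0; rfl
              · by_cases hd1 : d = 1
                · subst hd1; rfl
                · simp [direct, direct_alt, hd0, hd1]; try omega
            · by_cases hc1 : c = 1
              · subst hc1
                by_cases hd0 : d = 0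
                · subst hd0; rfl
                · by_cases hd1 : d = 1
                  · subst hd1; rfl
                  · simp [direct, direct_alt, hd0, hd1]; try omega
              · simp [direct, direct_alt, hc0, hc1]; try omega
          · simp [direct, direct_alt, hb0, hb1]; try omega
      · simp [direct, direct_alt, ha0, ha1]; try omega
  | [] => rfl
  | [a] => rw [direct_alt_not4 _ (by simp)]; simp [direct]
  | [a, b] => rw [direct_alt_not4 _ (by simp)]; simp [direct]
  | [a, b, c] => rw [direct_alt_not4 _ (by simp)]; simp [direct]
  | a :: b :: c :: d :: e :: rest => rw [direct_alt_not4 _ (by simp)]; simp [direct]
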